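-- pv_equiv track=rewrite | github.com/MarcusLassila/SSY196 | hw2/hat_puzzle.py | strategy
-- ===== SOURCE A (Python) =====
-- def strategy(hats):
--     guesses = []
--     good_differences = set(range(2, len(hats), 4))
--     for i in range(len(hats)):
--         weight = sum(hats[:i] + hats[i + 1:])
--         if abs(weight) in good_differences:
--             guesses.append(1 if weight < 0 else -1)
--         else:
--             guesses.append(None)
--     return guesses
-- ===== SOURCE B (Python) =====
-- def strategy(hats):
--     n = len(hats)
--     total = sum(hats)
--
--     def guess(h):
--         w = total - h
--         if 2 <= abs(w) < n and (abs(w) - 2) % 4 == 0: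
--             return 1 if w < 0 else -1
--         return None
--
--     return [guess(h) for h in hats]
-- ===== Notes on version B (the rewrite author's own statement) =====
-- stated objective: faster
-- what changed: B precomputes the total sum once and tests membership in range(2,n,4) arithmetically (2 <= |w| < n and (|w|-2)%4==0), replacing A's per-index O(n) leave-one-out slice sum and materialised set with an O(1) computation per element mapped directly over hats.
import Mathlib
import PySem

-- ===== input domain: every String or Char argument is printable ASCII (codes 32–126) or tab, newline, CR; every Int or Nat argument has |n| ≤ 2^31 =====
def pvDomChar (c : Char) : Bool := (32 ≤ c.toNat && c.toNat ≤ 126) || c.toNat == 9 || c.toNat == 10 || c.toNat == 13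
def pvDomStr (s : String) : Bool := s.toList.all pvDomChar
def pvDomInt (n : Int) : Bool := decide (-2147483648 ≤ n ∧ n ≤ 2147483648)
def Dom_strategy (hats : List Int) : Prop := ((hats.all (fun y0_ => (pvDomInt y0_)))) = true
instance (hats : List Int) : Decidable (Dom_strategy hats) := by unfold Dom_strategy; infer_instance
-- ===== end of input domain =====

-- B computes the leave-one-out weight as total − hats[i] (total summed once) and tests
-- membership in range(2, n, 4) arithmetically: O(n) instead of A's O(n²). Return value only.

-- ===== PORT A =====
def strategy (hats : List Int) : List (Option Int) :=
  -- guesses = []; good_differences = set(range(2, len(hats), 4))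
  let good : PySem.Set Int := PySem.Set.ofList (PySem.List.pyRange 2 (hats.length : Int) 4)
  -- for i in range(len(hats)): weight = sum(hats[:i] + hats[i+1:]); append …
  (PySem.List.pyRange 0 (hats.length : Int) 1).foldl
    (fun guesses i =>
      guesses ++
        [let weight := (PySem.List.slice hats none (some i) ++
                        PySem.List.slice hats (some (i + 1)) none).sum
         if |weight| ∈ good then some (if weight < 0 then 1 else -1) else none])
    []

-- ===== PORT B =====
def strategyAltGuess (n total h : Int) : Option Int :=
  let w := total - h
  if 2 ≤ |w| ∧ |w| < n ∧ PySem.Int.mod (|w| - 2) 4 = 0 then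
    some (if w < 0 then 1 else -1)
  else
    none

def strategy_alt (hats : List Int) : List (Option Int) :=
  hats.map (strategyAltGuess (hats.length : Int) hats.sum)

-- ===== PRECONDITION & SPEC =====
def Spec_strategy (hats : List Int) (out : List (Option Int)) : Prop := out = strategy_alt hats
instance (hats : List Int) (out : List (Option Int)) : Decidable (Spec_strategy hats out) := by unfold Spec_strategy; infer_instance

-- ===== CLAIM (what is proved, stated in full; the proofs are below) =====
def Claim_equal_strategy : Prop := ∀ (hats : List Int), Dom_strategy hats → Spec_strategy hats (strategy hats)

-- ===== LEMMAS AND PROOFS =====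

-- the leave-one-out slice sum of A equals B's total − hats[k]
lemma slice_sum_eq (hats : List Int) (k : Nat) (hk : k < hats.length) :
    (PySem.List.slice hats none (some (k : Int)) ++
      PySem.List.slice hats (some ((k : Int) + 1)) none).sum = hats.sum - hats[k] := by
  have h1 : PySem.List.slice hats none (some (k : Int)) = hats.take k :=
    PySem.List.slice_to_natCast hats k
  have h2 : PySem.List.slice hats (some ((k : Int) + 1)) none = hats.drop (k + 1) := by
    have : ((k : Int) + 1) = ((k + 1 : Nat) : Int) := by push_cast; ring
    rw [this, PySem.List.slice_from_natCast]
  have h3 : hats.drop k = hats[k] :: hats.drop (k + 1) :=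
    (List.getElem_cons_drop hk).symm
  have h4 : (hats.take k).sum + (hats.drop k).sum = hats.sum := by
    rw [← List.sum_append, List.take_append_drop]
  rw [h1, h2, List.sum_append]
  rw [h3] at h4
  simp only [List.sum_cons] at h4
  omega

-- A's set-membership test is B's arithmetic test
lemma mem_good_iff (n x : Int) :
    x ∈ PySem.Set.ofList (PySem.List.pyRange 2 n 4) ↔
      2 ≤ x ∧ x < n ∧ PySem.Int.mod (x - 2) 4 = 0 := by
  rw [PySem.Set.mem_ofList, PySem.List.mem_pyRange_iff_of_pos (by norm_num),
      PySem.Int.mod_eq_zero_iff_dvd]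

-- ===== VERDICT (by name: the statement is the Claim_ definition above) =====
theorem strategy_spec : Claim_equal_strategy := by
  intro hats _
  unfold Spec_strategy strategy strategy_alt
  rw [PySem.List.foldl_append_singleton_eq_map]
  apply List.ext_getElem
  · simp [PySem.List.length_pyRange_one]
  · intro k hkL hkR
    have hk : k < hats.length := by
      simpa [PySem.List.length_pyRange_one] using hkL
    simp only [List.nil_append, List.getElem_map, PySem.List.getElem_pyRange_one, zero_add]
    rw [slice_sum_eq hats k hk]
    simp only [strategyAltGuess, mem_good_iff]
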